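-- pv_equiv track=rewrite | github.com/acekapila/nexus | ai-article-generator/enhanced_complete_article_system.py | _build_enhanced_research_context
-- ===== SOURCE A (Python) =====
-- from typing import Dict, List, Optional
--
-- def _build_enhanced_research_context(research_data: Dict) -> str:
--     """Build research context from enhanced URL browsing data"""
--
--     context_parts = []
--
--     # Comprehensive themes from synthesis
--     themes = research_data.get("comprehensive_themes", [])
--     if themes:
--         context_parts.append(f"COMPREHENSIVE THEMES:\n" + "\n".join(f"- {theme}" for theme in themes))
--
--     # Evidence-based findings
--     findings = research_data.get("evidence_based_findings", [])
--     if findings: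
--         context_parts.append(f"EVIDENCE-BASED FINDINGS:\n" + "\n".join(f"- {finding}" for finding in findings))
--
--     # Novel insights from browsed content
--     novel_insights = research_data.get("novel_insights", [])
--     if novel_insights:
--         context_parts.append(f"NOVEL INSIGHTS FROM BROWSED SOURCES:\n" + "\n".join(f"- {insight}" for insight in novel_insights))
--
--     # Data-driven points with context
--     data_points = research_data.get("data_driven_points", [])
--     if data_points:
--         context_parts.append(f"DATA-DRIVEN INSIGHTS:\n" + "\n".join(f"- {point}" for point in data_points))
--
--     # Practical framework
--     framework = research_data.get("practical_framework", [])
--     if framework: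
--         context_parts.append(f"PRACTICAL FRAMEWORK:\n" + "\n".join(f"- {item}" for item in framework))
--
--     # Expert perspectives from browsed content
--     expert_perspectives = research_data.get("expert_perspectives", [])
--     if expert_perspectives:
--         context_parts.append(f"EXPERT PERSPECTIVES:\n" + "\n".join(f"- {perspective}" for perspective in expert_perspectives))
--
--     # Implementation strategies
--     strategies = research_data.get("implementation_strategies", [])
--     if strategies:
--         context_parts.append(f"IMPLEMENTATION STRATEGIES:\n" + "\n".join(f"- {strategy}" for strategy in strategies))
--
--     # Content gaps to address
--     gaps = research_data.get("content_gaps", [])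
--     if gaps:
--         context_parts.append(f"CONTENT GAPS TO ADDRESS:\n" + "\n".join(f"- {gap}" for gap in gaps))
--
--     # Insights from browsed content
--     browsed_insights = research_data.get("browsed_insights", [])
--     if browsed_insights:
--         context_parts.append(f"INSIGHTS FROM BROWSED ARTICLES:\n" + "\n".join(f"- {insight}" for insight in browsed_insights[:8]))
--
--     # Unique data points
--     unique_data = research_data.get("unique_data_points", [])
--     if unique_data:
--         context_parts.append(f"UNIQUE DATA POINTS:\n" + "\n".join(f"- {data}" for data in unique_data))
--
--     # Practical applications
--     applications = research_data.get("practical_applications", [])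
--     if applications:
--         context_parts.append(f"PRACTICAL APPLICATIONS:\n" + "\n".join(f"- {app}" for app in applications))
--
--     return "\n\n".join(context_parts)
-- ===== SOURCE B (Python) =====
-- _SPECS = [
--     ("comprehensive_themes", "COMPREHENSIVE THEMES:", None),
--     ("evidence_based_findings", "EVIDENCE-BASED FINDINGS:", None),
--     ("novel_insights", "NOVEL INSIGHTS FROM BROWSED SOURCES:", None),
--     ("data_driven_points", "DATA-DRIVEN INSIGHTS:", None),
--     ("practical_framework", "PRACTICAL FRAMEWORK:", None),
--     ("expert_perspectives", "EXPERT PERSPECTIVES:", None),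
--     ("implementation_strategies", "IMPLEMENTATION STRATEGIES:", None),
--     ("content_gaps", "CONTENT GAPS TO ADDRESS:", None),
--     ("browsed_insights", "INSIGHTS FROM BROWSED ARTICLES:", 8),
--     ("unique_data_points", "UNIQUE DATA POINTS:", None),
--     ("practical_applications", "PRACTICAL APPLICATIONS:", None),
-- ]
--
--
-- def _build_enhanced_research_context(research_data):
--     """Build research context from enhanced URL browsing data"""
--
--     def render(specs):
--         # build the context back-to-front by recursion, concatenating text
--         # directly (no intermediate list of parts, no str.join)
--         if not specs:
--             return ""
--         key, header, limit = specs[0]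
--         tail = render(specs[1:])
--         items = research_data.get(key, [])
--         if limit is not None:
--             items = items[:limit]
--         if not items:
--             return tail
--         section = header
--         for item in items:
--             section += "\n- " + item
--         return section if not tail else section + "\n\n" + tail
--
--     return render(_SPECS)
-- ===== Notes on version B (the rewrite author's own statement) =====
-- stated objective: alternative
-- what changed: Replaces A's eleven unrolled append-to-list blocks plus a final '\n\n'.join with a back-to-front recursion over a section table that concatenates the text directly, with no intermediate list of parts and no str.join.
import Mathlib
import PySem

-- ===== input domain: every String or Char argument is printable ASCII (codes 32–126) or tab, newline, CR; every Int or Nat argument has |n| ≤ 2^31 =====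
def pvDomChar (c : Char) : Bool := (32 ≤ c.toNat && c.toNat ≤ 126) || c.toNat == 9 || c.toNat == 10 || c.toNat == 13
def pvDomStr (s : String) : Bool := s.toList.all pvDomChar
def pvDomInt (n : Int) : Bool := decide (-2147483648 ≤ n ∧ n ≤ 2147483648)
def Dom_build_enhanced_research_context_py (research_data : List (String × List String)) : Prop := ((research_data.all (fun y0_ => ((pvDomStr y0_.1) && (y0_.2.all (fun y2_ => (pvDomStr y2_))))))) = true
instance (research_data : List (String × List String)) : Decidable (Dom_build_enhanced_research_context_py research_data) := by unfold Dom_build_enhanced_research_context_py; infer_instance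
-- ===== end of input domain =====

-- B builds the context back-to-front by recursion over a section table, concatenating
-- text directly (no list of parts, no str.join), instead of A's eleven unrolled
-- append-then-join blocks (objective: alternative decomposition).

-- dict.get(key, []) on the association list (first match, per the type convention); used by both ports
def pvGetList (d : List (String × List String)) (key : String) : List String :=
  match d.find? (fun p => p.1 == key) with
  | some p => p.2
  | none => []

-- ===== PORT A =====
def build_enhanced_research_context_py (research_data : List (String × List String)) : String :=
  let context_parts : List String := []
  let themes := pvGetList research_data "comprehensive_themes"
  let context_parts := if themes = [] then context_parts else
    context_parts ++ ["COMPREHENSIVE THEMES:\n" ++ PySem.Str.join "\n" (themes.map (fun theme => "- " ++ theme))]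
  let findings := pvGetList research_data "evidence_based_findings"
  let context_parts := if findings = [] then context_parts else
    context_parts ++ ["EVIDENCE-BASED FINDINGS:\n" ++ PySem.Str.join "\n" (findings.map (fun finding => "- " ++ finding))]
  let novel_insights := pvGetList research_data "novel_insights"
  let context_parts := if novel_insights = [] then context_parts else
    context_parts ++ ["NOVEL INSIGHTS FROM BROWSED SOURCES:\n" ++ PySem.Str.join "\n" (novel_insights.map (fun insight => "- " ++ insight))]
  let data_points := pvGetList research_data "data_driven_points"
  let context_parts := if data_points = [] then context_parts else
    context_parts ++ ["DATA-DRIVEN INSIGHTS:\n" ++ PySem.Str.join "\n" (data_points.map (fun point => "- " ++ point))]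
  let framework := pvGetList research_data "practical_framework"
  let context_parts := if framework = [] then context_parts else
    context_parts ++ ["PRACTICAL FRAMEWORK:\n" ++ PySem.Str.join "\n" (framework.map (fun item => "- " ++ item))]
  let expert_perspectives := pvGetList research_data "expert_perspectives"
  let context_parts := if expert_perspectives = [] then context_parts else
    context_parts ++ ["EXPERT PERSPECTIVES:\n" ++ PySem.Str.join "\n" (expert_perspectives.map (fun perspective => "- " ++ perspective))]
  let strategies := pvGetList research_data "implementation_strategies"
  let context_parts := if strategies = [] then context_parts else
    context_parts ++ ["IMPLEMENTATION STRATEGIES:\n" ++ PySem.Str.join "\n" (strategies.map (fun strategy => "- " ++ strategy))]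
  let gaps := pvGetList research_data "content_gaps"
  let context_parts := if gaps = [] then context_parts else
    context_parts ++ ["CONTENT GAPS TO ADDRESS:\n" ++ PySem.Str.join "\n" (gaps.map (fun gap => "- " ++ gap))]
  let browsed_insights := pvGetList research_data "browsed_insights"
  let context_parts := if browsed_insights = [] then context_parts else
    context_parts ++ ["INSIGHTS FROM BROWSED ARTICLES:\n" ++ PySem.Str.join "\n" ((PySem.List.slice browsed_insights none (some 8)).map (fun insight => "- " ++ insight))]
  let unique_data := pvGetList research_data "unique_data_points"
  let context_parts := if unique_data = [] then context_parts else
    context_parts ++ ["UNIQUE DATA POINTS:\n" ++ PySem.Str.join "\n" (unique_data.map (fun data => "- " ++ data))]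
  let applications := pvGetList research_data "practical_applications"
  let context_parts := if applications = [] then context_parts else
    context_parts ++ ["PRACTICAL APPLICATIONS:\n" ++ PySem.Str.join "\n" (applications.map (fun app => "- " ++ app))]
  PySem.Str.join "\n\n" context_parts

-- ===== PORT B =====
-- the section table of Source B: (key, header WITHOUT trailing newline, optional item limit)
def pvSpecs : List (String × String × Option Int) :=
  [("comprehensive_themes", "COMPREHENSIVE THEMES:", none),
   ("evidence_based_findings", "EVIDENCE-BASED FINDINGS:", none),
   ("novel_insights", "NOVEL INSIGHTS FROM BROWSED SOURCES:", none),
   ("data_driven_points", "DATA-DRIVEN INSIGHTS:", none),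
   ("practical_framework", "PRACTICAL FRAMEWORK:", none),
   ("expert_perspectives", "EXPERT PERSPECTIVES:", none),
   ("implementation_strategies", "IMPLEMENTATION STRATEGIES:", none),
   ("content_gaps", "CONTENT GAPS TO ADDRESS:", none),
   ("browsed_insights", "INSIGHTS FROM BROWSED ARTICLES:", some 8),
   ("unique_data_points", "UNIQUE DATA POINTS:", none),
   ("practical_applications", "PRACTICAL APPLICATIONS:", none)]

-- Source B's inner 'render': back-to-front recursion, direct string concatenation
def pvRender (research_data : List (String × List String)) : List (String × String × Option Int) → String
  | [] => ""
  | spec :: rest =>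
      let tail := pvRender research_data rest
      let items := pvGetList research_data spec.1
      let items := match spec.2.2 with
        | some limit => PySem.List.slice items none (some limit)
        | none => items
      if items = [] then tail
      else
        let sec := items.foldl (fun b item => b ++ "\n- " ++ item) spec.2.1
        if tail = "" then sec else sec ++ "\n\n" ++ tail

def build_enhanced_research_context_py_alt (research_data : List (String × List String)) : String :=
  pvRender research_data pvSpecs

-- ===== PRECONDITION & SPEC =====
def Spec_build_enhanced_research_context_py (research_data : List (String × List String)) (out : String) : Prop := out = build_enhanced_research_context_py_alt research_data
instance (research_data : List (String × List String)) (out : String) : Decidable (Spec_build_enhanced_research_context_py research_data out) := by unfold Spec_build_enhanced_research_context_py; infer_instance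

-- ===== CLAIM (what is proved, stated in full; the proofs are below) =====
def Claim_equal_build_enhanced_research_context_py : Prop := ∀ (research_data : List (String × List String)), Dom_build_enhanced_research_context_py research_data → Spec_build_enhanced_research_context_py research_data (build_enhanced_research_context_py research_data)

-- ===== LEMMAS AND PROOFS =====

-- concatenation of "\n- " ++ item over a list
def pvTail (l : List String) : String := PySem.Str.join "" (l.map (fun t => "\n- " ++ t))

lemma pvJoin_cons (sep x : String) (xs : List String) (h : xs ≠ []) :
    PySem.Str.join sep (x :: xs) = x ++ sep ++ PySem.Str.join sep xs := by
  cases xs with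
  | nil => simp at h
  | cons y ys => simp [PySem.Str.join, PySem.Chars.join_cons_cons, String.append_assoc]

lemma pvTail_cons' (t : String) (l : List String) : pvTail (t :: l) = ("\n- " ++ t) ++ pvTail l := by
  cases l with
  | nil => apply String.ext; simp [pvTail, PySem.Str.join]
  | cons y ys => simp [pvTail, pvJoin_cons, String.append_assoc]

lemma pvFoldl_eq_tail (l : List String) (h : String) :
    l.foldl (fun b t => b ++ "\n- " ++ t) h = h ++ pvTail l := by
  induction l generalizing h with
  | nil => simp [pvTail, PySem.Str.join]
  | cons a l ih =>
    simp only [List.foldl]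
    rw [ih, pvTail_cons']
    apply String.ext; simp

lemma pvJoin_items (l : List String) (hl : l ≠ []) :
    "\n" ++ PySem.Str.join "\n" (l.map (fun t => "- " ++ t)) = pvTail l := by
  induction l with
  | nil => simp at hl
  | cons a l ih =>
    cases l with
    | nil => apply String.ext; simp [PySem.Str.join, pvTail]
    | cons b m =>
      rw [List.map_cons, pvJoin_cons _ _ _ (by simp), pvTail_cons', ← ih (by simp)]
      apply String.ext; simp

-- one section: A's header-with-newline + join equals B's foldl from the bare header
lemma pvSec_eq (h : String) (l : List String) (hl : l ≠ []) :
    (h ++ "\n") ++ PySem.Str.join "\n" (l.map (fun t => "- " ++ t))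
      = l.foldl (fun b t => b ++ "\n- " ++ t) h := by
  rw [pvFoldl_eq_tail, ← pvJoin_items l hl, String.append_assoc]

-- a rendered section is never the empty string (its header is nonempty)
lemma pvSec_ne_empty (h : String) (l : List String) (hh : h.toList ≠ []) :
    l.foldl (fun b t => b ++ "\n- " ++ t) h ≠ "" := by
  rw [pvFoldl_eq_tail]
  intro hc
  have : (h ++ pvTail l).toList = ("" : String).toList := by rw [hc]
  simp at this
  exact hh (by simp [this.1])

-- the list of parts produced by the specs (A's context_parts, in B's form)
def pvParts (rd : List (String × List String)) : List (String × String × Option Int) → List String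
  | [] => []
  | spec :: rest =>
      let items := pvGetList rd spec.1
      let items := match spec.2.2 with
        | some limit => PySem.List.slice items none (some limit)
        | none => items
      (if items = [] then [] else [items.foldl (fun b t => b ++ "\n- " ++ t) spec.2.1])
        ++ pvParts rd rest

-- every part starts with its (nonempty) header
lemma pvParts_ne_empty (rd : List (String × List String)) (specs : List (String × String × Option Int))
    (hh : ∀ s ∈ specs, s.2.1.toList ≠ []) : ∀ p ∈ pvParts rd specs, p ≠ "" := by
  induction specs with
  | nil => simp [pvParts]
  | cons s rest ih =>
    intro p hp
    simp only [pvParts] at hp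
    rcases List.mem_append.mp hp with h1 | h2
    · by_cases hie : (match s.2.2 with
        | some limit => PySem.List.slice (pvGetList rd s.1) none (some limit)
        | none => pvGetList rd s.1) = []
      · rw [if_pos hie] at h1; simp at h1
      · rw [if_neg hie] at h1
        simp at h1
        subst h1
        exact pvSec_ne_empty _ _ (hh s (by simp))
    · exact ih (fun t ht => hh t (by simp [ht])) p h2

lemma pvJoin_ne_empty (ps : List String) (hps : ps ≠ []) (hne : ∀ p ∈ ps, p ≠ "") :
    PySem.Str.join "\n\n" ps ≠ "" := by
  cases ps with
  | nil => simp at hps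
  | cons x xs =>
    cases xs with
    | nil =>
      simpa [PySem.Str.join] using hne x (by simp)
    | cons y ys =>
      rw [pvJoin_cons _ _ _ (by simp)]
      intro hc
      have := congrArg String.toList hc
      simp at this

-- B's recursion computes the join of the parts
lemma pvRender_eq_join (rd : List (String × List String)) (specs : List (String × String × Option Int))
    (hh : ∀ s ∈ specs, s.2.1.toList ≠ []) :
    pvRender rd specs = PySem.Str.join "\n\n" (pvParts rd specs) := by
  induction specs with
  | nil => simp [pvRender, pvParts, PySem.Str.join]
  | cons s rest ih =>
    have hrest : ∀ t ∈ rest, t.2.1.toList ≠ [] := fun t ht => hh t (by simp [ht])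
    simp only [pvRender, pvParts, ih hrest]
    set items := (match s.2.2 with
      | some limit => PySem.List.slice (pvGetList rd s.1) none (some limit)
      | none => pvGetList rd s.1) with hitems
    by_cases hi : items = []
    · simp [hi]
    · simp only [hi, if_false]
      by_cases hp : pvParts rd rest = []
      · simp [hp, PySem.Str.join]
      · have hne := pvJoin_ne_empty (pvParts rd rest) hp (pvParts_ne_empty rd rest hrest)
        rw [if_neg hne, List.singleton_append, pvJoin_cons _ _ _ hp]

lemma pvTake8_eq_nil (l : List String) : PySem.List.slice l none (some 8) = [] ↔ l = [] := by
  rw [show ((8 : Int)) = ((8 : Nat) : Int) by norm_num, PySem.List.slice_to_natCast]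
  simp [List.take_eq_nil_iff]

lemma pvIf_append (c : Prop) [Decidable c] (acc : List String) (x : String) :
    (if c then acc else acc ++ [x]) = acc ++ (if c then [] else [x]) := by
  split <;> simp

lemma pvChunk (hfull h : String) (l : List String) (hE : hfull = h ++ "\n") :
    (if l = [] then ([] : List String) else [hfull ++ PySem.Str.join "\n" (l.map (fun t => "- " ++ t))])
      = (if l = [] then [] else [l.foldl (fun b t => b ++ "\n- " ++ t) h]) := by
  by_cases hl : l = []
  · simp [hl]
  · simp only [if_neg hl, hE, pvSec_eq h l hl]

lemma pvChunkBr (hfull h : String) (l : List String) (hE : hfull = h ++ "\n") :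
    (if l = [] then ([] : List String) else [hfull ++ PySem.Str.join "\n"
        ((PySem.List.slice l none (some 8)).map (fun t => "- " ++ t))])
      = (if PySem.List.slice l none (some 8) = [] then []
        else [(PySem.List.slice l none (some 8)).foldl (fun b t => b ++ "\n- " ++ t) h]) := by
  simp only [pvTake8_eq_nil]
  by_cases hl : l = []
  · simp [hl]
  · have hs : PySem.List.slice l none (some 8) ≠ [] := by
      simp only [ne_eq, pvTake8_eq_nil]; exact hl
    simp only [if_neg hl, hE, pvSec_eq _ _ hs]

-- ===== VERDICT (by name: the statement is the Claim_ definition above) =====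
theorem build_enhanced_research_context_py_spec : Claim_equal_build_enhanced_research_context_py := by
  intro rd _
  unfold Spec_build_enhanced_research_context_py build_enhanced_research_context_py build_enhanced_research_context_py_alt
  rw [pvRender_eq_join rd pvSpecs (by decide)]
  simp only [pvSpecs, pvParts, pvIf_append]
  simp only [List.nil_append, List.append_assoc]
  rw [pvChunk "COMPREHENSIVE THEMES:\n" "COMPREHENSIVE THEMES:" _ (by decide),
      pvChunk "EVIDENCE-BASED FINDINGS:\n" "EVIDENCE-BASED FINDINGS:" _ (by decide),
      pvChunk "NOVEL INSIGHTS FROM BROWSED SOURCES:\n" "NOVEL INSIGHTS FROM BROWSED SOURCES:" _ (by decide),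
      pvChunk "DATA-DRIVEN INSIGHTS:\n" "DATA-DRIVEN INSIGHTS:" _ (by decide),
      pvChunk "PRACTICAL FRAMEWORK:\n" "PRACTICAL FRAMEWORK:" _ (by decide),
      pvChunk "EXPERT PERSPECTIVES:\n" "EXPERT PERSPECTIVES:" _ (by decide),
      pvChunk "IMPLEMENTATION STRATEGIES:\n" "IMPLEMENTATION STRATEGIES:" _ (by decide),
      pvChunk "CONTENT GAPS TO ADDRESS:\n" "CONTENT GAPS TO ADDRESS:" _ (by decide),
      pvChunkBr "INSIGHTS FROM BROWSED ARTICLES:\n" "INSIGHTS FROM BROWSED ARTICLES:" _ (by decide),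
      pvChunk "UNIQUE DATA POINTS:\n" "UNIQUE DATA POINTS:" _ (by decide),
      pvChunk "PRACTICAL APPLICATIONS:\n" "PRACTICAL APPLICATIONS:" _ (by decide)]
  simp only [List.append_nil]
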